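-- pv_equiv track=rewrite | github.com/italo998carvalho/log-corrida | src/grid.py | sortFinalResult
-- ===== SOURCE A (Python) =====
-- def sortFinalResult(infosPiloto):
--     import operator
--
--     infosPiloto.sort(key=operator.itemgetter('tempo_total_de_prova'))
--
--     resultadoFinal = []
--     voltas = 4
--     count = 1
--
--     # Procura primeiros os pilotos com 4 voltas completas, depois 3, 2 e 1
--     while voltas > 0:
--         for info in infosPiloto:
--             if int(info['voltas_completadas']) == voltas:
--                 info['posicao'] = count
--                 resultadoFinal.append(info)
--                 count += 1
--         voltas -= 1
--
--     return resultadoFinal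
-- ===== SOURCE B (Python) =====
-- def sortFinalResult(infosPiloto):
--     import operator
--
--     infosPiloto.sort(key=operator.itemgetter('tempo_total_de_prova'))
--
--     # one pass: bucket each pilot by lap count (laps outside 1..4 are dropped)
--     buckets = {1: [], 2: [], 3: [], 4: []}
--     for info in infosPiloto:
--         v = int(info['voltas_completadas'])
--         if v in buckets:
--             buckets[v].append(info)
--
--     resultadoFinal = []
--     count = 1
--     for v in (4, 3, 2, 1):
--         for info in buckets[v]:
--             info['posicao'] = count
--             resultadoFinal.append(info)
--             count += 1
--     return resultadoFinal
-- ===== Notes on version B (the rewrite author's own statement) =====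
-- stated objective: simpler
-- what changed: replaces the 4-pass while/for scan over the sorted list by a single bucketing pass (dict of 4 lists) followed by one numbering pass over the buckets in order 4,3,2,1
import Mathlib
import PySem

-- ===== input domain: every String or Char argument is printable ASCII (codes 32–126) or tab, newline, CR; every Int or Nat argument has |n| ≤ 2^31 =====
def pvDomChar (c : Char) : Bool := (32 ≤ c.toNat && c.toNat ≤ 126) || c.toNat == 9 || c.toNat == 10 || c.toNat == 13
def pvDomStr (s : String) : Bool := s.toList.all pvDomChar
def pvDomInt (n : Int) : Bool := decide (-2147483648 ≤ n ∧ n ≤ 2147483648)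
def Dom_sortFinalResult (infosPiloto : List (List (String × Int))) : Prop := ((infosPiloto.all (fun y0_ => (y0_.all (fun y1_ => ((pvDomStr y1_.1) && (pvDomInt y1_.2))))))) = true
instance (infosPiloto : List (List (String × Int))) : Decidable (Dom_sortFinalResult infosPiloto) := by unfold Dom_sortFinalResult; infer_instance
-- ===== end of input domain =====

-- B replaces A's four filtering passes over the sorted list by one bucketing pass plus one
-- numbering pass (objective: simpler).  The equivalence is about the RETURN value only: in Python
-- both A and B also sort infosPiloto in place and set 'posicao' on the shared dicts.

-- shared python-dict primitives on the assoc-list encoding (lookup = first match;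
-- assignment overwrites the first match in place, otherwise appends — Python dict behaviour)
def dGetD (d : List (String × Int)) (k : String) (dflt : Int) : Int :=
  match d.find? (fun p => p.1 == k) with
  | some p => p.2
  | none => dflt

def dSet : List (String × Int) → String → Int → List (String × Int)
  | [], k, v => [(k, v)]
  | (k', v') :: t, k, v => if k' == k then (k, v) :: t else (k', v') :: dSet t k v

-- ===== PORT A =====
-- the body of A's inner 'for info in infosPiloto' loop at lap count v
def stepA (v : Int) (acc : List (List (String × Int)) × Int) (d : List (String × Int)) :
    List (List (String × Int)) × Int :=
  if dGetD d "voltas_completadas" 0 == v then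
    (acc.1 ++ [dSet d "posicao" acc.2], acc.2 + 1)
  else acc

-- A's 'while voltas > 0' loop, counting voltas down from 4
def loopA (s : List (List (String × Int))) :
    Nat → (List (List (String × Int)) × Int) → List (List (String × Int)) × Int
  | 0, acc => acc
  | v + 1, acc => loopA s v (s.foldl (stepA ((v : Int) + 1)) acc)

def sortFinalResult (infosPiloto : List (List (String × Int))) : List (List (String × Int)) :=
  (loopA (PySem.List.sorted infosPiloto (fun d => dGetD d "tempo_total_de_prova" 0)) 4 ([], 1)).1

-- ===== PORT B =====
-- bucketing step: drop each pilot into the bucket for its lap count (1..4), else ignore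
def bstep (b : List (List (String × Int)) × List (List (String × Int)) ×
               List (List (String × Int)) × List (List (String × Int)))
    (d : List (String × Int)) :
    List (List (String × Int)) × List (List (String × Int)) ×
    List (List (String × Int)) × List (List (String × Int)) :=
  if dGetD d "voltas_completadas" 0 == 1 then (b.1 ++ [d], b.2.1, b.2.2.1, b.2.2.2)
  else if dGetD d "voltas_completadas" 0 == 2 then (b.1, b.2.1 ++ [d], b.2.2.1, b.2.2.2)
  else if dGetD d "voltas_completadas" 0 == 3 then (b.1, b.2.1, b.2.2.1 ++ [d], b.2.2.2)
  else if dGetD d "voltas_completadas" 0 == 4 then (b.1, b.2.1, b.2.2.1, b.2.2.2 ++ [d])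
  else b

-- the buckets concatenated in visiting order 4, 3, 2, 1
def bucketsOrdered (b : List (List (String × Int)) × List (List (String × Int)) ×
                        List (List (String × Int)) × List (List (String × Int))) :
    List (List (String × Int)) :=
  b.2.2.2 ++ b.2.2.1 ++ b.2.1 ++ b.1

-- numbering pass: set 'posicao' = running count and append
def numStep (acc : List (List (String × Int)) × Int) (d : List (String × Int)) :
    List (List (String × Int)) × Int :=
  (acc.1 ++ [dSet d "posicao" acc.2], acc.2 + 1)

def sortFinalResult_alt (infosPiloto : List (List (String × Int))) : List (List (String × Int)) :=
  ((bucketsOrdered ((PySem.List.sorted infosPiloto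
      (fun d => dGetD d "tempo_total_de_prova" 0)).foldl bstep ([], [], [], []))).foldl
    numStep ([], 1)).1

-- ===== PRECONDITION & SPEC =====
-- Pre_ excludes exactly the inputs on which A raises KeyError: some pilot dict lacking the
-- key 'tempo_total_de_prova' (sort key) or 'voltas_completadas'.
def Pre_sortFinalResult (infosPiloto : List (List (String × Int))) : Prop :=
  (infosPiloto.all (fun d =>
    d.any (fun p => p.1 == "tempo_total_de_prova") &&
    d.any (fun p => p.1 == "voltas_completadas"))) = true
instance (infosPiloto : List (List (String × Int))) : Decidable (Pre_sortFinalResult infosPiloto) := by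
  unfold Pre_sortFinalResult; infer_instance

def pvWitness_sortFinalResult : (List (List (String × Int))) :=
  [[("tempo_total_de_prova", 10), ("voltas_completadas", 4)],
   [("tempo_total_de_prova", 7), ("voltas_completadas", 3)]]

def Spec_sortFinalResult (infosPiloto : List (List (String × Int))) (out : List (List (String × Int))) : Prop := out = sortFinalResult_alt infosPiloto
instance (infosPiloto : List (List (String × Int))) (out : List (List (String × Int))) : Decidable (Spec_sortFinalResult infosPiloto out) := by unfold Spec_sortFinalResult; infer_instance

-- ===== CLAIM (what is proved, stated in full; the proofs are below) =====
def Claim_equal_sortFinalResult : Prop := ∀ (infosPiloto : List (List (String × Int))), Dom_sortFinalResult infosPiloto → Pre_sortFinalResult infosPiloto → Spec_sortFinalResult infosPiloto (sortFinalResult infosPiloto)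

-- ===== LEMMAS AND PROOFS =====

-- the common 'numbering' of a run of pilots starting at position c
def numb : List (List (String × Int)) → Int → List (List (String × Int))
  | [], _ => []
  | d :: t, c => dSet d "posicao" c :: numb t (c + 1)

def pVolta (v : Int) (d : List (String × Int)) : Bool :=
  dGetD d "voltas_completadas" 0 == v

theorem numb_append (a b : List (List (String × Int))) (c : Int) :
    numb (a ++ b) c = numb a c ++ numb b (c + a.length) := by
  induction a generalizing c with
  | nil => simp [numb]
  | cons d t ih =>
    simp only [List.cons_append, numb, ih, List.length_cons]
    have h : c + 1 + (t.length : Int) = c + ((t.length + 1 : Nat) : Int) := by push_cast; ring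
    rw [h]

theorem passA_eq (v : Int) (s : List (List (String × Int)))
    (res : List (List (String × Int))) (c : Int) :
    s.foldl (stepA v) (res, c) =
      (res ++ numb (s.filter (pVolta v)) c, c + (s.filter (pVolta v)).length) := by
  induction s generalizing res c with
  | nil => simp [numb]
  | cons d t ih =>
    simp only [List.foldl_cons]
    by_cases h : (dGetD d "voltas_completadas" 0 == v) = true
    · rw [show stepA v (res, c) d = (res ++ [dSet d "posicao" c], c + 1) by simp [stepA, h]]
      rw [ih]
      have hp : pVolta v d = true := h
      simp [hp, numb]
      omega
    · rw [show stepA v (res, c) d = (res, c) by simp [stepA, h]]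
      rw [ih]
      have hp : pVolta v d = false := by simp [pVolta, h]
      simp [hp]

theorem numbfold_eq (l : List (List (String × Int))) (res : List (List (String × Int))) (c : Int) :
    l.foldl numStep (res, c) = (res ++ numb l c, c + l.length) := by
  induction l generalizing res c with
  | nil => simp [numb]
  | cons d t ih =>
    simp only [List.foldl_cons]
    rw [show numStep (res, c) d = (res ++ [dSet d "posicao" c], c + 1) from rfl, ih]
    simp [numb]
    omega

theorem bucket_eq (s : List (List (String × Int)))
    (b1 b2 b3 b4 : List (List (String × Int))) :
    s.foldl bstep (b1, b2, b3, b4) =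
      (b1 ++ s.filter (pVolta 1), b2 ++ s.filter (pVolta 2),
       b3 ++ s.filter (pVolta 3), b4 ++ s.filter (pVolta 4)) := by
  induction s generalizing b1 b2 b3 b4 with
  | nil => simp
  | cons d t ih =>
    simp only [List.foldl_cons]
    by_cases h1 : dGetD d "voltas_completadas" 0 = 1
    · rw [show bstep (b1, b2, b3, b4) d = (b1 ++ [d], b2, b3, b4) by simp [bstep, h1], ih]
      simp [pVolta, h1]
    · by_cases h2 : dGetD d "voltas_completadas" 0 = 2
      · rw [show bstep (b1, b2, b3, b4) d = (b1, b2 ++ [d], b3, b4) by simp [bstep, h2], ih]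
        simp [pVolta, h2]
      · by_cases h3 : dGetD d "voltas_completadas" 0 = 3
        · rw [show bstep (b1, b2, b3, b4) d = (b1, b2, b3 ++ [d], b4) by simp [bstep, h3], ih]
          simp [pVolta, h3]
        · by_cases h4 : dGetD d "voltas_completadas" 0 = 4
          · rw [show bstep (b1, b2, b3, b4) d = (b1, b2, b3, b4 ++ [d]) by simp [bstep, h4], ih]
            simp [pVolta, h4]
          · rw [show bstep (b1, b2, b3, b4) d = (b1, b2, b3, b4) by
                simp [bstep, h1, h2, h3, h4], ih]
            simp [pVolta, h1, h2, h3, h4]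

-- ===== VERDICT (by name: the statement is the Claim_ definition above) =====
theorem sortFinalResult_spec : Claim_equal_sortFinalResult := by
  intro infos _ _
  unfold Spec_sortFinalResult sortFinalResult sortFinalResult_alt
  generalize PySem.List.sorted infos (fun d => dGetD d "tempo_total_de_prova" 0) = s
  rw [bucket_eq]
  simp only [bucketsOrdered, List.nil_append]
  rw [numbfold_eq]
  simp only [loopA]
  rw [passA_eq, passA_eq, passA_eq, passA_eq]
  simp only [numb_append, List.nil_append, List.append_assoc]
  push_cast
  ring_nf
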